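-- pv_equiv track=rewrite | github.com/WXLyndon/dp-practice | Fibonacci-numbers/number_factors.py | count_ways_recursive
-- ===== SOURCE A (Python) =====
-- def count_ways_recursive(dp, n):
--     if n == 0:
--         return 1
--     if n == 1:
--         return 1
--     if n == 2:
--         return 1
--     if n == 3:
--         return 2
--
--     dp[n] = count_ways_recursive(dp, n - 1) + count_ways_recursive(dp, n - 3) + count_ways_recursive(dp, n - 4)
--
--     return dp[n]
-- ===== SOURCE B (Python) =====
-- def count_ways_recursive(dp, n):
--     # Bottom-up rolling-window DP over the recurrence f(i)=f(i-1)+f(i-3)+f(i-4),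
--     # filling dp[i] on the way up exactly as A does (same in-place mutation).
--     if n == 0 or n == 1 or n == 2:
--         return 1
--     if n == 3:
--         return 2
--     a, b, c, d = 1, 1, 1, 2
--     for i in range(4, n + 1):
--         a, b, c, d = b, c, d, d + b + a
--         dp[i] = d
--     return d
-- ===== Notes on version B (the rewrite author's own statement) =====
-- stated objective: alternative
-- what changed: Replaces the exponential top-down recursion (which never reads its memo table) with a single bottom-up loop carrying a 4-value rolling window of the recurrence.
import Mathlib
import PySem

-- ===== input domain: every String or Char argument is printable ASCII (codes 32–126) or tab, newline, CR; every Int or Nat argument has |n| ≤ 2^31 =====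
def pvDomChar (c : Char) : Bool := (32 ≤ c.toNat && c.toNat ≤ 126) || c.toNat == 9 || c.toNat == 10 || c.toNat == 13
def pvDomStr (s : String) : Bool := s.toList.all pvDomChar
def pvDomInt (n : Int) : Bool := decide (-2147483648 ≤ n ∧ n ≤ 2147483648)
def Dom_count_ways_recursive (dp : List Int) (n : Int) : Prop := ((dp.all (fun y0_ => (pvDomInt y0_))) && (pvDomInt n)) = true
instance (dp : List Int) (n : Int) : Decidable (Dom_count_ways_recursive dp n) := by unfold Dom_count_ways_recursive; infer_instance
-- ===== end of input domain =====

-- B replaces A's top-down recursion with one bottom-up rolling-window loop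
-- (objective: alternative). Both Pythons write dp[4..n] in place with the same
-- values; the Lean ports and the equivalence proved here are about the RETURN value only.


-- ===== PORT A =====
-- Literal port of A's recursion. The 'n < 0' branch is a totality guard only: there
-- Python recurses forever (RecursionError), which Pre_ excludes. A's write 'dp[n] = …'
-- and read-back 'return dp[n]' return exactly the computed sum (Pre_ keeps n in range).
def count_ways_recursive (dp : List Int) (n : Int) : Int :=
  if n = 0 then 1
  else if n = 1 then 1
  else if n = 2 then 1
  else if n = 3 then 2
  else if n < 0 then 0
  else count_ways_recursive dp (n - 1) + count_ways_recursive dp (n - 3)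
         + count_ways_recursive dp (n - 4)
termination_by n.toNat
decreasing_by all_goals omega

-- ===== PORT B =====
-- Port of Source B: base cases, then a fold over range(4, n+1) carrying (a,b,c,d);
-- Source B's in-place write 'dp[i] = d' is a mutation and is not modelled (return value only).
def count_ways_recursive_alt (dp : List Int) (n : Int) : Int :=
  if n = 0 ∨ n = 1 ∨ n = 2 then 1
  else if n = 3 then 2
  else
    ((PySem.List.pyRange 4 (n + 1) 1).foldl
      (fun (s : Int × Int × Int × Int) _ => (s.2.1, s.2.2.1, s.2.2.2, s.2.2.2 + s.2.1 + s.1))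
      (1, 1, 1, 2)).2.2.2

-- ===== PRECONDITION & SPEC =====
-- Pre_ excludes exactly the inputs where Python A raises: n < 0 (unbounded recursion,
-- RecursionError) and n ≥ 4 with n ≥ len(dp) (IndexError on 'dp[n] = …').
def Pre_count_ways_recursive (dp : List Int) (n : Int) : Prop :=
  0 ≤ n ∧ (4 ≤ n → n < dp.length)
instance (dp : List Int) (n : Int) : Decidable (Pre_count_ways_recursive dp n) := by
  unfold Pre_count_ways_recursive; infer_instance
def pvWitness_count_ways_recursive : List Int × Int := ([0, 0, 0, 0, 0, 0], 5)

def Spec_count_ways_recursive (dp : List Int) (n : Int) (out : Int) : Prop := out = count_ways_recursive_alt dp n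
instance (dp : List Int) (n : Int) (out : Int) : Decidable (Spec_count_ways_recursive dp n out) := by unfold Spec_count_ways_recursive; infer_instance

-- ===== CLAIM (what is proved, stated in full; the proofs are below) =====
def Claim_equal_count_ways_recursive : Prop := ∀ (dp : List Int) (n : Int), Dom_count_ways_recursive dp n → Pre_count_ways_recursive dp n → Spec_count_ways_recursive dp n (count_ways_recursive dp n)

-- ===== LEMMAS AND PROOFS =====

-- The mathematical recurrence both programs compute.
def pvG : Nat → Int
  | 0 => 1
  | 1 => 1
  | 2 => 1
  | 3 => 2
  | (m + 4) => pvG (m + 3) + pvG (m + 1) + pvG m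

lemma portA_eq_pvG (dp : List Int) : ∀ k : Nat, count_ways_recursive dp (k : Int) = pvG k := by
  intro k
  induction k using Nat.strong_induction_on with
  | _ k ih =>
    match k with
    | 0 => simp [count_ways_recursive, pvG]
    | 1 => simp [count_ways_recursive, pvG]
    | 2 => simp [count_ways_recursive, pvG]
    | 3 => simp [count_ways_recursive, pvG]
    | (m + 4) =>
      rw [count_ways_recursive]
      have h1 : ((m + 4 : Nat) : Int) - 1 = ((m + 3 : Nat) : Int) := by push_cast; ring
      have h3 : ((m + 4 : Nat) : Int) - 3 = ((m + 1 : Nat) : Int) := by push_cast; ring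
      have h4 : ((m + 4 : Nat) : Int) - 4 = ((m : Nat) : Int) := by push_cast; ring
      have hne0 : ¬ ((m + 4 : Nat) : Int) = 0 := by omega
      have hne1 : ¬ ((m + 4 : Nat) : Int) = 1 := by omega
      have hne2 : ¬ ((m + 4 : Nat) : Int) = 2 := by omega
      have hne3 : ¬ ((m + 4 : Nat) : Int) = 3 := by omega
      have hnneg : ¬ ((m + 4 : Nat) : Int) < 0 := by omega
      rw [if_neg hne0, if_neg hne1, if_neg hne2, if_neg hne3, if_neg hnneg,
          h1, h3, h4, ih (m + 3) (by omega), ih (m + 1) (by omega), ih m (by omega)]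
      rfl

def pvStep : Int × Int × Int × Int → Int → Int × Int × Int × Int :=
  fun s _ => (s.2.1, s.2.2.1, s.2.2.2, s.2.2.2 + s.2.1 + s.1)

lemma fold_invariant : ∀ m : Nat,
    (PySem.List.pyRange 4 ((m : Int) + 4) 1).foldl pvStep (1, 1, 1, 2)
      = (pvG m, pvG (m + 1), pvG (m + 2), pvG (m + 3)) := by
  intro m
  induction m with
  | zero =>
    rw [PySem.List.pyRange_one_eq_nil (by omega)]
    rfl
  | succ m ih =>
    have hsplit : ((m + 1 : Nat) : Int) + 4 = ((m : Int) + 4) + 1 := by push_cast; ring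
    rw [hsplit, PySem.List.pyRange_one_succ_right (by omega), List.foldl_append, ih]
    show (pvG (m + 1), pvG (m + 2), pvG (m + 3), pvG (m + 3) + pvG (m + 1) + pvG m)
      = (pvG (m + 1), pvG (m + 1 + 1), pvG (m + 1 + 2), pvG (m + 1 + 3))
    have : pvG (m + 1 + 3) = pvG (m + 3) + pvG (m + 1) + pvG m := by
      show pvG (m + 4) = _; rw [pvG]
    simp [this]

lemma portB_eq_pvG (dp : List Int) : ∀ k : Nat, count_ways_recursive_alt dp (k : Int) = pvG k := by
  intro k
  match k with
  | 0 => simp [count_ways_recursive_alt, pvG]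
  | 1 => simp [count_ways_recursive_alt, pvG]
  | 2 => simp [count_ways_recursive_alt, pvG]
  | 3 => simp [count_ways_recursive_alt, pvG]
  | (m + 4) =>
    have hne : ¬ (((m + 4 : Nat) : Int) = 0 ∨ ((m + 4 : Nat) : Int) = 1 ∨ ((m + 4 : Nat) : Int) = 2) := by omega
    have hne3 : ¬ ((m + 4 : Nat) : Int) = 3 := by omega
    rw [count_ways_recursive_alt, if_neg hne, if_neg hne3]
    have h : ((m + 4 : Nat) : Int) + 1 = ((m + 1 : Nat) : Int) + 4 := by push_cast; ring
    rw [h]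
    have := fold_invariant (m + 1)
    rw [show (fun (s : Int × Int × Int × Int) (_ : Int) => (s.2.1, s.2.2.1, s.2.2.2, s.2.2.2 + s.2.1 + s.1)) = pvStep from rfl, this]

-- ===== VERDICT (by name: the statement is the Claim_ definition above) =====
theorem count_ways_recursive_spec : Claim_equal_count_ways_recursive := by
  intro dp n _ hpre
  obtain ⟨hn0, -⟩ := hpre
  unfold Spec_count_ways_recursive
  have hn : n = ((n.toNat : Nat) : Int) := by omega
  rw [hn, portA_eq_pvG, portB_eq_pvG]
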